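-- pv_equiv track=rewrite | github.com/David-5-5/tutorial | python/algo/leecode2/algo3008.py | beautifulIndices2
-- ===== SOURCE A (Python) =====
-- from typing import List
--
-- def beautifulIndices2(s: str, a: str, b: str, k: int) -> List[int]:
--     # https://www.zhihu.com/question/21923021/answer/37475572
--     # pi is prefix function
--     # similar with oi wiki -> prefix function and kmp
--     def calculate_pi(pattern):
--         pi = [0] * len(pattern)
--         mlen = 0
--         for i in range(1, len(pattern)):
--             while mlen > 0 and pattern[mlen] != pattern[i]:
--                 mlen = pi[mlen - 1]
--             if pattern[mlen] == pattern[i]: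
--                 mlen += 1
--             pi[i] = mlen
--         return pi
--
--     # The search is good than oi wiki, s + '#' + p
--     def search(text: str, pattern: str) -> List[int]:
--         positions = []
--         pi = calculate_pi(pattern)
--         count = 0
--         for i in range(len(text)):
--             while count > 0 and pattern[count] != text[i]:
--                 count = pi[count - 1]
--             if pattern[count] == text[i]:
--                 count += 1
--             if count == len(pattern):
--                 positions.append(i - len(pattern) + 1)
--                 count = pi[count - 1]
--         return positions
--
--     from bisect import bisect_right
--     ans = []
--     amtach = search(s,a)
--     bmtach = search(s,b)
--     if not bmtach:
--         return ans
--     for pos in amtach: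
--         inx = bisect_right(bmtach, pos+k)
--         if inx and bmtach[inx-1]>=pos-k:
--             ans.append(pos)
--
--     return ans
-- ===== SOURCE B (Python) =====
-- from typing import List
--
-- def beautifulIndices2(s: str, a: str, b: str, k: int) -> List[int]:
--     # Same KMP matchers as the original; the query phase is a single linear
--     # two-pointer sweep instead of one binary search per a-match.
--     def calculate_pi(pattern):
--         pi = [0] * len(pattern)
--         mlen = 0
--         for i in range(1, len(pattern)):
--             while mlen > 0 and pattern[mlen] != pattern[i]:
--                 mlen = pi[mlen - 1]
--             if pattern[mlen] == pattern[i]: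
--                 mlen += 1
--             pi[i] = mlen
--         return pi
--
--     def search(text: str, pattern: str) -> List[int]:
--         positions = []
--         pi = calculate_pi(pattern)
--         count = 0
--         for i in range(len(text)):
--             while count > 0 and pattern[count] != text[i]:
--                 count = pi[count - 1]
--             if pattern[count] == text[i]:
--                 count += 1
--             if count == len(pattern):
--                 positions.append(i - len(pattern) + 1)
--                 count = pi[count - 1]
--         return positions
--
--     amatch = search(s, a)
--     bmatch = search(s, b)
--     ans = []
--     j = 0
--     n = len(bmatch)
--     for pos in amatch:
--         while j < n and bmatch[j] <= pos + k:
--             j += 1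
--         if j and bmatch[j - 1] >= pos - k:
--             ans.append(pos)
--     return ans
-- ===== Notes on version B (the rewrite author's own statement) =====
-- stated objective: alternative
-- what changed: The KMP matchers are kept, but the query phase replaces one bisect_right binary search per a-match with a single linear two-pointer sweep over the sorted b-match list.
import Mathlib
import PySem

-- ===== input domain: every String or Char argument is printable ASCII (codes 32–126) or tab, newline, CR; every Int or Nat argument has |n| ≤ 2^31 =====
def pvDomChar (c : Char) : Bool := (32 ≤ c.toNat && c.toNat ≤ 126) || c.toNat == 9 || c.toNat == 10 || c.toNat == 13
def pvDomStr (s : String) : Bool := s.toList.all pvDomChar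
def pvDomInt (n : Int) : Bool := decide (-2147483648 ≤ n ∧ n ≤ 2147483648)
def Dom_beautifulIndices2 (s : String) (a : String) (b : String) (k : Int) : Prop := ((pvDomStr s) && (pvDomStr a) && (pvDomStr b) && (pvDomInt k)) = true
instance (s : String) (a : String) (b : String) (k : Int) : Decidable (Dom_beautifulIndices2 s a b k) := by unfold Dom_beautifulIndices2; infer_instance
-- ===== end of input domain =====

-- B keeps A's KMP matchers and replaces the per-a-match bisect_right binary search
-- by one linear two-pointer sweep over the sorted b-match list (objective: alternative).

-- ===== PORT A =====
-- shared KMP helpers (identical code in Source A and Source B; both ports use them)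
-- the inner `while mlen > 0 and pattern[mlen] != c: mlen = pi[mlen-1]` loop,
-- run with fuel = mlen.toNat (enough: pi[i] ≤ i, so mlen strictly decreases)
def kmpAdjust (p : List Char) (pi : List Int) (c : Char) : Int → Nat → Int
  | mlen, 0 => mlen
  | mlen, fuel + 1 =>
    if mlen > 0 ∧ p.getD mlen.toNat ' ' ≠ c then
      kmpAdjust p pi c (pi.getD (mlen - 1).toNat 0) fuel
    else mlen

-- calculate_pi(pattern)
def calcPi (p : List Char) : List Int :=
  ((List.range' 1 (p.length - 1)).foldl
    (fun (st : List Int × Int) i =>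
      let c := p.getD i ' '
      let mlen := kmpAdjust p st.1 c st.2 st.2.toNat
      let mlen := if p.getD mlen.toNat ' ' = c then mlen + 1 else mlen
      (st.1.set i mlen, mlen))
    (List.replicate p.length 0, 0)).1

-- the body of search's `for i in range(len(text))` loop
def kmpStep (t p : List Char) (pi : List Int) (st : List Int × Int) (i : Nat) : List Int × Int :=
  let c := t.getD i ' '
  let count := kmpAdjust p pi c st.2 st.2.toNat
  let count := if p.getD count.toNat ' ' = c then count + 1 else count
  if count = (p.length : Int) then
    (st.1 ++ [(i : Int) - p.length + 1], pi.getD (count - 1).toNat 0)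
  else (st.1, count)

-- search(text, pattern)
def kmpSearch (t p : List Char) : List Int :=
  ((List.range t.length).foldl (kmpStep t p (calcPi p)) ([], 0)).1

-- bisect.bisect_right (CPython's lo/hi loop, transliterated)
def bisectRightAux (l : List Int) (x : Int) (lo hi : Nat) : Nat :=
  if _h : lo < hi then
    let mid := (lo + hi) / 2
    if x < l.getD mid 0 then bisectRightAux l x lo mid
    else bisectRightAux l x (mid + 1) hi
  else lo
termination_by hi - lo

-- the body of A's `for pos in amtach` loop
def stepA (bm : List Int) (k : Int) (ans : List Int) (pos : Int) : List Int :=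
  let inx := bisectRightAux bm (pos + k) 0 bm.length
  if inx ≠ 0 ∧ bm.getD (inx - 1) 0 ≥ pos - k then ans ++ [pos] else ans

def beautifulIndices2 (s : String) (a : String) (b : String) (k : Int) : List Int :=
  let amtach := kmpSearch s.toList a.toList
  let bmtach := kmpSearch s.toList b.toList
  if bmtach = [] then []
  else amtach.foldl (stepA bmtach k) []

-- ===== PORT B =====
-- `while j < n and bmatch[j] <= pos + k: j += 1`
def advance (bm : List Int) (pk : Int) (j : Nat) : Nat :=
  if _h : j < bm.length ∧ bm.getD j 0 ≤ pk then advance bm pk (j + 1) else j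
termination_by bm.length - j

-- the body of B's `for pos in amatch` loop (state: ans, j)
def stepB (bm : List Int) (k : Int) (st : List Int × Nat) (pos : Int) : List Int × Nat :=
  let j := advance bm (pos + k) st.2
  (if j ≠ 0 ∧ bm.getD (j - 1) 0 ≥ pos - k then st.1 ++ [pos] else st.1, j)

def beautifulIndices2_alt (s : String) (a : String) (b : String) (k : Int) : List Int :=
  let amatch := kmpSearch s.toList a.toList
  let bmatch := kmpSearch s.toList b.toList
  (amatch.foldl (stepB bmatch k) ([], 0)).1

-- ===== PRECONDITION & SPEC =====
-- Pre_ excludes exactly the inputs where Python A raises IndexError (an empty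
-- pattern with a nonempty text makes `pattern[count]` go out of range); B raises there too.
def Pre_beautifulIndices2 (s : String) (a : String) (b : String) (k : Int) : Prop :=
  s = "" ∨ (a ≠ "" ∧ b ≠ "")
instance (s : String) (a : String) (b : String) (k : Int) : Decidable (Pre_beautifulIndices2 s a b k) := by unfold Pre_beautifulIndices2; infer_instance

def pvWitness_beautifulIndices2 : String × String × String × Int := ("aba", "a", "ab", 1)

def Spec_beautifulIndices2 (s : String) (a : String) (b : String) (k : Int) (out : List Int) : Prop := out = beautifulIndices2_alt s a b k
instance (s : String) (a : String) (b : String) (k : Int) (out : List Int) : Decidable (Spec_beautifulIndices2 s a b k out) := by unfold Spec_beautifulIndices2; infer_instance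

-- ===== CLAIM (what is proved, stated in full; the proofs are below) =====
def Claim_equal_beautifulIndices2 : Prop := ∀ (s : String) (a : String) (b : String) (k : Int), Dom_beautifulIndices2 s a b k → Pre_beautifulIndices2 s a b k → Spec_beautifulIndices2 s a b k (beautifulIndices2 s a b k)

-- ===== LEMMAS AND PROOFS =====

-- kmpStep either keeps the positions list or appends i - |p| + 1 to it
lemma kmpStep_fst (t p : List Char) (pi : List Int) (st : List Int × Int) (i : Nat) :
    (kmpStep t p pi st i).1 = st.1 ∨ (kmpStep t p pi st i).1 = st.1 ++ [(i : Int) - p.length + 1] := by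
  unfold kmpStep
  dsimp only
  split_ifs <;> simp

-- invariant proof: the positions produced by the search fold are strictly increasing
lemma kmpFold_sorted (t p : List Char) (pi : List Int) :
    ∀ (idxs : List Nat) (st : List Int × Int),
      idxs.Pairwise (· < ·) →
      st.1.Pairwise (· < ·) →
      (∀ x ∈ st.1, ∀ i ∈ idxs, x < (i : Int) - p.length + 1) →
      (idxs.foldl (kmpStep t p pi) st).1.Pairwise (· < ·) := by
  intro idxs
  induction idxs with
  | nil => intro st _ hs _; simpa using hs
  | cons i rest ih =>
    intro st hp hs hb
    simp only [List.foldl_cons]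
    rcases List.pairwise_cons.mp hp with ⟨hi, hrest⟩
    rcases kmpStep_fst t p pi st i with h | h
    · exact ih _ hrest (h ▸ hs) (by
        intro x hx j hj
        rw [h] at hx
        exact hb x hx j (List.mem_cons_of_mem _ hj))
    · refine ih _ hrest ?_ ?_
      · rw [h, List.pairwise_append]
        refine ⟨hs, List.pairwise_singleton _ _, ?_⟩
        intro x hx y hy
        simp only [List.mem_singleton] at hy
        subst hy
        exact hb x hx i (List.mem_cons_self ..)
      · intro x hx j hj
        rw [h] at hx
        rcases List.mem_append.mp hx with hx | hx
        · exact hb x hx j (List.mem_cons_of_mem _ hj)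
        · simp only [List.mem_singleton] at hx
          subst hx
          have : i < j := hi j hj
          omega

lemma kmpSearch_sorted (t p : List Char) : (kmpSearch t p).Pairwise (· < ·) := by
  unfold kmpSearch
  exact kmpFold_sorted t p _ _ _ (List.pairwise_lt_range) (List.Pairwise.nil) (by simp)

-- strictly sorted lists are monotone through getD
lemma sorted_getD_le (l : List Int) (hs : l.Pairwise (· < ·)) {i j : Nat}
    (hij : i ≤ j) (hj : j < l.length) : l.getD i 0 ≤ l.getD j 0 := by
  rcases Nat.lt_or_ge i j with h | h
  · have := (List.pairwise_iff_getElem.mp hs) i j (by omega) hj h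
    rw [List.getD_eq_getElem l 0 (by omega), List.getD_eq_getElem l 0 hj]
    omega
  · have : i = j := by omega
    subst this; exact le_refl _

-- the rank r with "everything below r is ≤ x, everything from r on is > x" is unique
lemma rank_unique (l : List Int) (x : Int) (r1 r2 : Nat)
    (h1 : r1 ≤ l.length) (h2 : r2 ≤ l.length)
    (hl1 : ∀ i < r1, l.getD i 0 ≤ x) (hr1 : ∀ i, r1 ≤ i → i < l.length → x < l.getD i 0)
    (hl2 : ∀ i < r2, l.getD i 0 ≤ x) (hr2 : ∀ i, r2 ≤ i → i < l.length → x < l.getD i 0) :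
    r1 = r2 := by
  rcases Nat.lt_trichotomy r1 r2 with h | h | h
  · have ha := hl2 r1 h
    have hb := hr1 r1 (le_refl _) (by omega)
    omega
  · exact h
  · have ha := hl1 r2 h
    have hb := hr2 r2 (le_refl _) (by omega)
    omega

-- bisect_right's result is the rank of x in a strictly sorted list
lemma bisect_spec (l : List Int) (hs : l.Pairwise (· < ·)) (x : Int) :
    ∀ (lo hi : Nat), lo ≤ hi → hi ≤ l.length →
      (∀ i < lo, l.getD i 0 ≤ x) → (∀ i, hi ≤ i → i < l.length → x < l.getD i 0) →
      bisectRightAux l x lo hi ≤ l.length ∧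
      (∀ i < bisectRightAux l x lo hi, l.getD i 0 ≤ x) ∧
      (∀ i, bisectRightAux l x lo hi ≤ i → i < l.length → x < l.getD i 0) := by
  intro lo hi
  induction lo, hi using bisectRightAux.induct l x with
  | case1 lo hi hlt mid hcmp ih =>
    intro _ hhi hlo hhiP
    rw [bisectRightAux, dif_pos hlt, if_pos hcmp]
    refine ih (by omega) (by omega) hlo ?_
    intro i hmi hil
    calc x < l.getD mid 0 := hcmp
      _ ≤ l.getD i 0 := sorted_getD_le l hs hmi hil
  | case2 lo hi hlt mid hcmp ih =>
    intro _ hhi hlo hhiP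
    rw [bisectRightAux, dif_pos hlt, if_neg hcmp]
    refine ih (by omega) hhi ?_ hhiP
    intro i hi'
    have hm : mid < l.length := by omega
    calc l.getD i 0 ≤ l.getD mid 0 := sorted_getD_le l hs (by omega) hm
      _ ≤ x := by omega
  | case3 lo hi hge =>
    intro hle hhi hlo hhiP
    rw [bisectRightAux, dif_neg hge]
    exact ⟨by omega, hlo, fun i h1 h2 => hhiP i (by omega) h2⟩

-- the two-pointer advance also reaches exactly that rank
lemma advance_spec (bm : List Int) (pk : Int) :
    ∀ j, j ≤ bm.length → (∀ i < j, bm.getD i 0 ≤ pk) →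
      advance bm pk j ≤ bm.length ∧
      (∀ i < advance bm pk j, bm.getD i 0 ≤ pk) ∧
      (advance bm pk j < bm.length → pk < bm.getD (advance bm pk j) 0) := by
  intro j
  induction j using advance.induct bm pk with
  | case1 j hcond ih =>
    intro _ hlo
    rw [advance, dif_pos hcond]
    refine ih (by omega) ?_
    intro i hi
    rcases Nat.lt_or_ge i j with h | h
    · exact hlo i h
    · have : i = j := by omega
      subst this; exact hcond.2
  | case2 j hcond =>
    intro hj hlo
    rw [advance, dif_neg hcond]
    refine ⟨hj, hlo, ?_⟩
    intro hjl
    push Not at hcond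
    exact hcond hjl

-- with sorted bm, advance from rank (and the whole rank from its one-sided "> pk" fact)
lemma advance_rank (bm : List Int) (hs : bm.Pairwise (· < ·)) (pk : Int)
    (j : Nat) (hj : j ≤ bm.length) (hlo : ∀ i < j, bm.getD i 0 ≤ pk) :
    advance bm pk j ≤ bm.length ∧
    (∀ i < advance bm pk j, bm.getD i 0 ≤ pk) ∧
    (∀ i, advance bm pk j ≤ i → i < bm.length → pk < bm.getD i 0) := by
  obtain ⟨h1, h2, h3⟩ := advance_spec bm pk j hj hlo
  refine ⟨h1, h2, ?_⟩
  intro i hri hil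
  have hr : advance bm pk j < bm.length := by omega
  calc pk < bm.getD (advance bm pk j) 0 := h3 hr
    _ ≤ bm.getD i 0 := sorted_getD_le bm hs hri hil

-- main loop equivalence: the bisect-per-pos fold equals the two-pointer fold
lemma fold_eq (bm : List Int) (hs : bm.Pairwise (· < ·)) (k : Int) :
    ∀ (am : List Int), am.Pairwise (· < ·) →
      ∀ (ans : List Int) (j : Nat), j ≤ bm.length →
        (∀ pos ∈ am, ∀ i < j, bm.getD i 0 ≤ pos + k) →
        am.foldl (stepA bm k) ans = (am.foldl (stepB bm k) (ans, j)).1 := by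
  intro am
  induction am with
  | nil => intro _ ans j _ _; rfl
  | cons pos rest ih =>
    intro hp ans j hj hlo
    rcases List.pairwise_cons.mp hp with ⟨hpos, hrest⟩
    simp only [List.foldl_cons]
    have hlo' : ∀ i < j, bm.getD i 0 ≤ pos + k := hlo pos (List.mem_cons_self ..)
    obtain ⟨haj, hal, har⟩ := advance_rank bm hs (pos + k) j hj hlo'
    obtain ⟨hbj, hbl, hbr⟩ := bisect_spec bm hs (pos + k) 0 bm.length (Nat.zero_le _)
      (le_refl _) (by omega) (by omega)
    have heq : bisectRightAux bm (pos + k) 0 bm.length = advance bm (pos + k) j :=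
      rank_unique bm (pos + k) _ _ hbj haj hbl hbr hal har
    have hstep : stepA bm k ans pos = (stepB bm k (ans, j) pos).1 := by
      unfold stepA stepB
      rw [heq]
    have hsnd : (stepB bm k (ans, j) pos).2 = advance bm (pos + k) j := rfl
    rw [hstep]
    have := ih hrest (stepB bm k (ans, j) pos).1 (stepB bm k (ans, j) pos).2
      (by rw [hsnd]; exact haj)
      (by
        rw [hsnd]
        intro pos' hpos' i hi
        have h1 : bm.getD i 0 ≤ pos + k := hal i hi
        have h2 : pos < pos' := hpos pos' hpos'
        omega)
    rw [this]

-- with bm = [], the two-pointer fold (started at j = 0) never appends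
lemma foldB_nil (k : Int) :
    ∀ (am : List Int) (ans : List Int), (am.foldl (stepB [] k) (ans, 0)).1 = ans := by
  intro am
  induction am with
  | nil => intro ans; rfl
  | cons pos rest ih =>
    intro ans
    have h1 : advance [] (pos + k) 0 = 0 := by rw [advance]; simp
    have : stepB [] k (ans, 0) pos = (ans, 0) := by
      unfold stepB
      rw [h1]
      simp
    simp only [List.foldl_cons, this, ih]

-- ===== VERDICT (by name: the statement is the Claim_ definition above) =====
theorem beautifulIndices2_spec : Claim_equal_beautifulIndices2 := by
  intro s a b k _ _
  unfold Spec_beautifulIndices2 beautifulIndices2 beautifulIndices2_alt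
  by_cases hbm : kmpSearch s.toList b.toList = []
  · rw [if_pos hbm, hbm, foldB_nil]
  · rw [if_neg hbm]
    exact fold_eq _ (kmpSearch_sorted s.toList b.toList) k _
      (kmpSearch_sorted s.toList a.toList) [] 0 (Nat.zero_le _) (by omega)
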